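-- pv_equiv track=rewrite | github.com/joepcash/old_HIFL_site_migration- | src/blog_post.py | _get_scorers_str
-- ===== SOURCE A (Python) =====
-- def _get_scorers_str(games, html_text):
--     lines = html_text.splitlines()
--     # Find all games in html text and append goals string to game's list
--     for i in range(len(lines)):
--         for j in range(len(games)):
--             if lines[i] == games[j][0]:
--                 if lines[i + 1].startswith("Goals: "):
--                     if lines[i + 1].endswith((";", ",")):
--                         games[j].append(lines[i + 1] + " " + lines[i + 2])
--                     else:
--                         games[j].append(lines[i + 1])
--
--     # Any games for which a goal string wasn't found, add a none goal string
--     for j in range(len(games)):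
--         if len(games[j]) == 4:
--             games[j].append(None)
--
--     return games
-- ===== SOURCE B (Python) =====
-- def _get_scorers_str(games, html_text):
--     lines = html_text.splitlines()
--     titles = {g[0] for g in games}
--     goals = {}
--     for i, line in enumerate(lines):
--         if line in titles:
--             nxt = lines[i + 1]
--             if nxt.startswith("Goals: "):
--                 s = nxt + " " + lines[i + 2] if nxt.endswith((";", ",")) else nxt
--                 goals.setdefault(line, []).append(s)
--     for g in games:
--         g.extend(goals.get(g[0], []))
--         if len(g) == 4:
--             g.append(None)
--     return games
-- ===== Notes on version B (the rewrite author's own statement) =====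
-- stated objective: alternative
-- what changed: A runs a nested lines x games scan appending to games in place; B builds a dict from title line to its goal strings in one pass over the lines (guarded by a title set) and then extends each game by a single dict lookup.
-- outside the precondition, e.g. on _get_scorers_str([[]], ''): A returns [[]], B raises IndexError
import Mathlib
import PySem

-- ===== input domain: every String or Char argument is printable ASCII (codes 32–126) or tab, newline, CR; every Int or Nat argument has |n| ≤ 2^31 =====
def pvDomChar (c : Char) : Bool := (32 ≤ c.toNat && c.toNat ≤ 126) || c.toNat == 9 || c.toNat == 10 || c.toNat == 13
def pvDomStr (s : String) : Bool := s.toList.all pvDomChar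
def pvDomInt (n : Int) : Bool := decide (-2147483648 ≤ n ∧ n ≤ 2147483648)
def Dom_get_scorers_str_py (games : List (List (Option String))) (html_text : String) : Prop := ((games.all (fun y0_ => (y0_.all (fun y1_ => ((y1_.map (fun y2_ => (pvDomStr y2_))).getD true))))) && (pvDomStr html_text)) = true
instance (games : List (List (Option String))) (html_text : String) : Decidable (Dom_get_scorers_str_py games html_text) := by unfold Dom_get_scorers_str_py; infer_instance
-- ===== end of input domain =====

-- B replaces A's nested line×game double scan by one indexing pass over the lines (a dict
-- from title line to its goal strings) plus one lookup pass over the games (objective: alternative).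
-- Both Pythons mutate `games` in place; the equivalence proved here is about the return value.

-- ===== PORT A =====
def get_scorers_str_py (games : List (List (Option String))) (html_text : String) : List (List (Option String)) :=
  let lines := PySem.Str.splitlines html_text
  let games1 :=
    (PySem.List.pyRange 0 (PySem.List.len lines)).foldl (fun gs i =>
      (PySem.List.pyRange 0 (PySem.List.len gs)).foldl (fun gs2 j =>
        if some (PySem.List.pyGetD lines i "") = (PySem.List.pyGetD gs2 j []).headD none then
          if PySem.Str.startswith (PySem.List.pyGetD lines (i + 1) "") "Goals: " then
            if PySem.Str.endswith (PySem.List.pyGetD lines (i + 1) "") ";" ||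
                PySem.Str.endswith (PySem.List.pyGetD lines (i + 1) "") "," then
              PySem.List.pySetD gs2 j (PySem.List.pyGetD gs2 j [] ++
                [some (PySem.List.pyGetD lines (i + 1) "" ++ " " ++ PySem.List.pyGetD lines (i + 2) "")])
            else
              PySem.List.pySetD gs2 j (PySem.List.pyGetD gs2 j [] ++ [some (PySem.List.pyGetD lines (i + 1) "")])
          else gs2
        else gs2) gs) games
  (PySem.List.pyRange 0 (PySem.List.len games1)).foldl (fun gs j =>
    if PySem.List.len (PySem.List.pyGetD gs j []) = 4 then
      PySem.List.pySetD gs j (PySem.List.pyGetD gs j [] ++ [none])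
    else gs) games1

-- ===== PORT B =====
-- (dict keys are the matched title lines; `some line` models that Python's keys are the line
--  strings, so a `None` game title never matches a key — exact for goals.get(g[0], []))
def get_scorers_str_py_alt (games : List (List (Option String))) (html_text : String) : List (List (Option String)) :=
  let lines := PySem.Str.splitlines html_text
  let titles : PySem.Set (Option String) := PySem.Set.ofList (games.map (fun g => g.headD none))
  let goals : PySem.Dict (Option String) (List (Option String)) :=
    (PySem.List.enumerate lines).foldl
      (fun d p =>
        if PySem.Set.contains titles (some p.2) then
          let nxt := PySem.List.pyGetD lines (p.1 + 1) ""
          if PySem.Str.startswith nxt "Goals: " then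
            let s := if PySem.Str.endswith nxt ";" || PySem.Str.endswith nxt "," then
                       nxt ++ " " ++ PySem.List.pyGetD lines (p.1 + 2) ""
                     else nxt
            d.modify (some p.2) [] (fun v => v ++ [some s])
          else d
        else d)
      PySem.Dict.empty
  games.map (fun g =>
    let g2 := g ++ goals.getD (g.headD none) []
    if PySem.List.len g2 = 4 then g2 ++ [none] else g2)

-- ===== PRECONDITION & SPEC =====
-- Pre_ excludes inputs where Python A raises IndexError: a game title matched at one of the last
-- lines (so lines[i+1] / lines[i+2] is out of range), or an empty inner list (games[j][0]).
-- It requires all inner lists nonempty even when html_text has no lines (where A returns but B's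
-- title-set construction g[0] raises) — that narrows A's return domain only at html_text = "".
def Pre_get_scorers_str_py (games : List (List (Option String))) (html_text : String) : Prop :=
  let lines := PySem.Str.splitlines html_text
  (∀ g ∈ games, g ≠ []) ∧
  ∀ i ∈ List.range lines.length,
    (∃ g ∈ games, g.headD none = some (lines.getD i "")) →
      i + 1 < lines.length ∧
        ((PySem.Str.startswith (lines.getD (i + 1) "") "Goals: " = true ∧
            (PySem.Str.endswith (lines.getD (i + 1) "") ";" = true ∨
              PySem.Str.endswith (lines.getD (i + 1) "") "," = true)) →
          i + 2 < lines.length)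
instance (games : List (List (Option String))) (html_text : String) : Decidable (Pre_get_scorers_str_py games html_text) := by unfold Pre_get_scorers_str_py; infer_instance

def pvWitness_get_scorers_str_py : List (List (Option String)) × String :=
  ([[some "A v B", some "1", none]], "A v B\nGoals: x")

def Spec_get_scorers_str_py (games : List (List (Option String))) (html_text : String) (out : List (List (Option String))) : Prop := out = get_scorers_str_py_alt games html_text
instance (games : List (List (Option String))) (html_text : String) (out : List (List (Option String))) : Decidable (Spec_get_scorers_str_py games html_text out) := by unfold Spec_get_scorers_str_py; infer_instance

-- ===== CLAIM (what is proved, stated in full; the proofs are below) =====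
def Claim_equal_get_scorers_str_py : Prop := ∀ (games : List (List (Option String))) (html_text : String), Dom_get_scorers_str_py games html_text → Pre_get_scorers_str_py games html_text → Spec_get_scorers_str_py games html_text (get_scorers_str_py games html_text)

-- ===== LEMMAS AND PROOFS =====

-- abbreviations for the pieces both ports compute
def pvStr (lines : List String) (i : Nat) : String :=
  if PySem.Str.endswith (lines.getD (i + 1) "") ";" || PySem.Str.endswith (lines.getD (i + 1) "") "," then
    lines.getD (i + 1) "" ++ " " ++ lines.getD (i + 2) ""
  else lines.getD (i + 1) ""

def pvExt (lines : List String) (i : Nat) : List (Option String) :=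
  if PySem.Str.startswith (lines.getD (i + 1) "") "Goals: " then [some (pvStr lines i)] else []

def pvStrs (lines : List String) (t : Option String) : List (Option String) :=
  (List.range lines.length).flatMap (fun i => if some (lines.getD i "") = t then pvExt lines i else [])

def pvF2 (g2 : List (Option String)) : List (Option String) :=
  if ((g2.length : Int)) = 4 then g2 ++ [none] else g2

-- cast glue for lines[i+1], lines[i+2]
lemma pv_pyGetD_cast_one {α : Type} (xs : List α) (i : Nat) (d : α) :
    PySem.List.pyGetD xs ((i : Int) + 1) d = xs.getD (i + 1) d := by
  rw [show ((i : Int) + 1) = ((i + 1 : Nat) : Int) by push_cast; ring, PySem.List.pyGetD_natCast]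

lemma pv_pyGetD_cast_two {α : Type} (xs : List α) (i : Nat) (d : α) :
    PySem.List.pyGetD xs ((i : Int) + 2) d = xs.getD (i + 2) d := by
  rw [show ((i : Int) + 2) = ((i + 2 : Nat) : Int) by push_cast; ring, PySem.List.pyGetD_natCast]

-- a fold over range(len gs) that only updates index j pointwise is a map
lemma pv_set_fold {G : Type} (d : G) (f : G → G) (step : List G → Nat → List G)
    (hstep : ∀ (acc : List G) (j : Nat), j < acc.length → step acc j = acc.set j (f (acc.getD j d))) :
    ∀ (gs pre : List G),
      List.foldl step (pre ++ gs) (List.range' pre.length gs.length) = pre ++ gs.map f := by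
  intro gs
  induction gs with
  | nil => intro pre; simp
  | cons g rest ih =>
      intro pre
      rw [List.length_cons, List.range'_succ, List.foldl_cons]
      have hlen : pre.length < (pre ++ g :: rest).length := by simp
      have h1 : (pre ++ g :: rest).getD pre.length d = g := by
        simp [List.getD_eq_getElem?_getD]
      have h2 : (pre ++ g :: rest).set pre.length (f g) = (pre ++ [f g]) ++ rest := by
        simp
      rw [hstep _ _ hlen, h1, h2]
      have h3 := ih (pre ++ [f g])
      simp only [List.length_append, List.length_cons, List.length_nil] at h3 ⊢
      simpa [List.append_assoc] using h3

lemma pv_set_fold0 {G : Type} (d : G) (f : G → G) (step : List G → Nat → List G)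
    (hstep : ∀ (acc : List G) (j : Nat), j < acc.length → step acc j = acc.set j (f (acc.getD j d)))
    (gs : List G) :
    List.foldl step gs (List.range gs.length) = gs.map f := by
  have := pv_set_fold d f step hstep gs []
  simpa [List.range_eq_range'] using this

-- a fold that maps each element independently commutes with the outer iteration
lemma pv_fold_map {α G : Type} (f : α → G → G) :
    ∀ (l : List α) (init : List G),
      List.foldl (fun gs i => gs.map (f i)) init l
        = init.map (fun g => List.foldl (fun g i => f i g) g l) := by
  intro l
  induction l with
  | nil => intro init; simp
  | cons a l ih =>
      intro init
      simp only [List.foldl_cons, ih, List.map_map]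
      rfl

-- per-game fold: the head never changes, so the appends accumulate as a flatMap
lemma pv_gfold {α : Type} (h0 : α) (q : α → Nat → Prop) [inst : ∀ h i, Decidable (q h i)]
    (s : Nat → List α) (g : List α) (hg : g ≠ []) :
    ∀ (l : List Nat) (acc : List α),
      List.foldl (fun g i => if q (g.headD h0) i then g ++ s i else g) (g ++ acc) l
        = g ++ (acc ++ l.flatMap (fun i => if q (g.headD h0) i then s i else [])) := by
  intro l
  induction l with
  | nil => intro acc; simp
  | cons i l ih =>
      intro acc
      obtain ⟨a, g', rfl⟩ : ∃ a g', g = a :: g' := by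
        cases g with
        | nil => exact absurd rfl hg
        | cons a g' => exact ⟨a, g', rfl⟩
      by_cases hq : q a i
      · simp only [List.foldl_cons, List.cons_append, List.headD_cons, if_pos hq]
        have := ih (acc ++ s i)
        simp only [List.cons_append, List.headD_cons] at this
        simpa [List.flatMap_cons, if_pos hq, List.append_assoc] using this
      · simp only [List.foldl_cons, List.cons_append, List.headD_cons, if_neg hq]
        have := ih acc
        simp only [List.cons_append, List.headD_cons] at this
        rw [this]
        simp [List.flatMap_cons, if_neg hq]

-- the dict-building fold of B, observed through one lookup
lemma pv_dictfold (lines : List String) (titles : PySem.Set (Option String)) (t : Option String) :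
    ∀ (l : List Nat) (d : PySem.Dict (Option String) (List (Option String))),
      (List.foldl (fun d (i : Nat) =>
          if PySem.Set.contains titles (some (lines.getD i "")) then
            if PySem.Str.startswith (lines.getD (i + 1) "") "Goals: " then
              d.modify (some (lines.getD i "")) []
                (fun v => v ++ [some (if PySem.Str.endswith (lines.getD (i + 1) "") ";" ||
                                          PySem.Str.endswith (lines.getD (i + 1) "") "," then
                                        lines.getD (i + 1) "" ++ " " ++ lines.getD (i + 2) ""
                                      else lines.getD (i + 1) "")])
            else d
          else d) d l).getD t []
        = d.getD t [] ++ l.flatMap (fun i =>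
            if (some (lines.getD i "") = t ∧
                PySem.Set.contains titles (some (lines.getD i "")) = true ∧
                PySem.Str.startswith (lines.getD (i + 1) "") "Goals: " = true)
            then [some (pvStr lines i)] else []) := by
  intro l
  induction l with
  | nil => intro d; simp
  | cons i l ih =>
      intro d
      by_cases hc : PySem.Set.contains titles (some (lines.getD i "")) = true
      · by_cases hsw : PySem.Str.startswith (lines.getD (i + 1) "") "Goals: " = true
        · simp only [List.foldl_cons, if_pos hc, if_pos hsw, ih, PySem.Dict.getD_modify,
            List.flatMap_cons]
          by_cases ht : some (lines.getD i "") = t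
          · subst ht
            have hc' : some (lines[i]?.getD "") ∈ titles := by
              simpa [List.getD_eq_getElem?_getD] using hc
            have hsw' : PySem.Chars.startswith (lines[i + 1]?.getD "").toList
                ['G', 'o', 'a', 'l', 's', ':', ' '] = true := by
              simpa [List.getD_eq_getElem?_getD] using hsw
            simp [hc', hsw', pvStr, List.getD_eq_getElem?_getD]
          · rw [if_neg (show ¬ (t = some (lines.getD i "")) from fun h => ht h.symm),
                if_neg (show ¬ (some (lines.getD i "") = t ∧
                    PySem.Set.contains titles (some (lines.getD i "")) = true ∧
                    PySem.Str.startswith (lines.getD (i + 1) "") "Goals: " = true) from fun h => ht h.1)]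
            simp
        · simp only [List.foldl_cons, if_pos hc, if_neg hsw, ih, List.flatMap_cons]
          rw [if_neg (fun h => hsw h.2.2)]
          simp
      · simp only [List.foldl_cons, if_neg hc, ih, List.flatMap_cons]
        rw [if_neg (fun h => hc h.2.1)]
        simp

lemma pv_pySetD_natCast {α : Type} (xs : List α) (n : Nat) (v : α) (h : n < xs.length) :
    PySem.List.pySetD xs (n : Int) v = xs.set n v := by
  simp [PySem.List.pySetD, PySem.List.pySet?, PySem.List.pyIdx?, h]

lemma pv_set_self {α : Type} (xs : List α) (j : Nat) (d : α) (h : j < xs.length) :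
    xs.set j (xs.getD j d) = xs := by
  rw [List.getD_eq_getElem xs d h, List.set_getElem_self]

-- the per-line, per-game update A performs
def pvFA (lines : List String) (i : Nat) (g : List (Option String)) : List (Option String) :=
  if some (lines.getD i "") = g.headD none then
    if PySem.Str.startswith (lines.getD (i + 1) "") "Goals: " then
      if PySem.Str.endswith (lines.getD (i + 1) "") ";" || PySem.Str.endswith (lines.getD (i + 1) "") "," then
        g ++ [some (lines.getD (i + 1) "" ++ " " ++ lines.getD (i + 2) "")]
      else g ++ [some (lines.getD (i + 1) "")]
    else g
  else g

lemma pvFA_eq_ext (lines : List String) (i : Nat) (g : List (Option String)) :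
    pvFA lines i g = if some (lines.getD i "") = g.headD none then g ++ pvExt lines i else g := by
  unfold pvFA pvExt pvStr
  by_cases hm : some (lines.getD i "") = g.headD none
  · simp only [if_pos hm]
    by_cases hsw : PySem.Str.startswith (lines.getD (i + 1) "") "Goals: " = true
    · simp only [if_pos hsw]
      by_cases hew : (PySem.Str.endswith (lines.getD (i + 1) "") ";" || PySem.Str.endswith (lines.getD (i + 1) "") ",") = true
      · simp only [if_pos hew]
      · simp only [if_neg hew]
    · simp only [if_neg hsw, List.append_nil]
  · simp only [if_neg hm]

-- A evaluates to a map over games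
lemma pv_A_eq (games : List (List (Option String))) (html_text : String)
    (hne : ∀ g ∈ games, g ≠ []) :
    get_scorers_str_py games html_text
      = games.map (fun g =>
          pvF2 (g ++ pvStrs (PySem.Str.splitlines html_text) (g.headD none))) := by
  unfold get_scorers_str_py
  simp only [PySem.List.len, PySem.List.pyRange_zero_natCast, List.foldl_map,
    PySem.List.pyGetD_natCast, pv_pyGetD_cast_one, pv_pyGetD_cast_two]
  set lines := PySem.Str.splitlines html_text with hlines
  -- inner fold is a pointwise map
  have hin : ∀ (gs : List (List (Option String))) (i : Nat),
      List.foldl (fun gs2 (j : Nat) =>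
        if some (lines.getD i "") = (gs2.getD j []).headD none then
          if PySem.Str.startswith (lines.getD (i + 1) "") "Goals: " then
            if PySem.Str.endswith (lines.getD (i + 1) "") ";" || PySem.Str.endswith (lines.getD (i + 1) "") "," then
              PySem.List.pySetD gs2 (j : Int) (gs2.getD j [] ++
                [some (lines.getD (i + 1) "" ++ " " ++ lines.getD (i + 2) "")])
            else
              PySem.List.pySetD gs2 (j : Int) (gs2.getD j [] ++ [some (lines.getD (i + 1) "")])
          else gs2
        else gs2) gs (List.range gs.length) = gs.map (pvFA lines i) := by
    intro gs i
    apply pv_set_fold0 ([] : List (Option String)) (pvFA lines i)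
    intro acc j hj
    unfold pvFA
    by_cases hm : some (lines.getD i "") = (acc.getD j []).headD none
    · by_cases hsw : PySem.Str.startswith (lines.getD (i + 1) "") "Goals: " = true
      · by_cases hew : (PySem.Str.endswith (lines.getD (i + 1) "") ";" || PySem.Str.endswith (lines.getD (i + 1) "") ",") = true
        · simp only [if_pos hm, if_pos hsw, if_pos hew]
          exact pv_pySetD_natCast _ _ _ hj
        · simp only [if_pos hm, if_pos hsw, if_neg hew]
          exact pv_pySetD_natCast _ _ _ hj
      · simp only [if_pos hm, if_neg hsw]
        exact (pv_set_self acc j [] hj).symm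
    · simp only [if_neg hm]
      exact (pv_set_self acc j [] hj).symm
  simp only [hin]
  rw [pv_fold_map (fun i g => pvFA lines i g) (List.range lines.length) games]
  -- phase 2 is a map as well
  have h2 : ∀ (gs : List (List (Option String))),
      List.foldl (fun gs (j : Nat) =>
        if (((gs.getD j []).length : Int)) = 4 then
          PySem.List.pySetD gs (j : Int) (gs.getD j [] ++ [none])
        else gs) gs (List.range gs.length) = gs.map pvF2 := by
    intro gs
    apply pv_set_fold0 ([] : List (Option String)) pvF2
    intro acc j hj
    unfold pvF2
    by_cases h4 : (((acc.getD j []).length : Int)) = 4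
    · simp only [if_pos h4]
      exact pv_pySetD_natCast _ _ _ hj
    · simp only [if_neg h4]
      exact (pv_set_self acc j [] hj).symm
  rw [h2, List.map_map]
  apply List.map_congr_left
  intro g hg
  simp only [Function.comp]
  congr 1
  -- per-game accumulation
  have hq := pv_gfold (none : Option String)
      (fun h i => some (lines.getD i "") = h) (fun i => pvExt lines i) g (hne g hg)
      (List.range lines.length) []
  simp only [List.append_nil, List.nil_append] at hq
  calc List.foldl (fun g i => pvFA lines i g) g (List.range lines.length)
      = List.foldl (fun g i => if some (lines.getD i "") = g.headD none then g ++ pvExt lines i else g)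
          g (List.range lines.length) := by
        apply PySem.List.foldl_congr_mem
        intro acc x _
        exact pvFA_eq_ext lines x acc
    _ = g ++ pvStrs lines (g.headD none) := by rw [hq]; rfl

-- B evaluates to a map over games
lemma pv_B_eq (games : List (List (Option String))) (html_text : String) :
    get_scorers_str_py_alt games html_text
      = games.map (fun g =>
          pvF2 (g ++ pvStrs (PySem.Str.splitlines html_text) (g.headD none))) := by
  unfold get_scorers_str_py_alt
  simp only [PySem.List.enumerate_eq_map_pyRange (PySem.Str.splitlines html_text) "",
    PySem.List.len, PySem.List.pyRange_zero_natCast, List.map_map, List.foldl_map,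
    Function.comp, PySem.List.pyGetD_natCast, pv_pyGetD_cast_one, pv_pyGetD_cast_two]
  set lines := PySem.Str.splitlines html_text with hlines
  apply List.map_congr_left
  intro g hg
  have hT : PySem.Set.contains (PySem.Set.ofList (games.map (fun g => g.headD none))) (g.headD none) = true := by
    have hmem : (g.headD none) ∈ PySem.Set.ofList (games.map (fun g => g.headD none)) :=
      (PySem.Set.mem_ofList _ _).2 (List.mem_map_of_mem hg)
    simpa [PySem.Set.contains] using hmem
  rw [pv_dictfold lines (PySem.Set.ofList (games.map (fun g => g.headD none))) (g.headD none)
        (List.range lines.length) PySem.Dict.empty]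
  simp only [PySem.Dict.getD_empty, List.nil_append]
  have hflat : (List.range lines.length).flatMap (fun i =>
      if (some (lines.getD i "") = g.headD none ∧
          PySem.Set.contains (PySem.Set.ofList (games.map (fun g => g.headD none)))
            (some (lines.getD i "")) = true ∧
          PySem.Str.startswith (lines.getD (i + 1) "") "Goals: " = true)
      then [some (pvStr lines i)] else []) = pvStrs lines (g.headD none) := by
    unfold pvStrs
    congr 1
    funext i
    by_cases hm : some (lines.getD i "") = g.headD none
    · rw [if_pos hm]
      unfold pvExt
      by_cases hsw : PySem.Str.startswith (lines.getD (i + 1) "") "Goals: " = true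
      · rw [if_pos ⟨hm, by rw [hm]; exact hT, hsw⟩, if_pos hsw]
      · rw [if_neg (fun h => hsw h.2.2), if_neg hsw]
    · rw [if_neg (fun h => hm h.1), if_neg hm]
  rw [hflat]
  rfl

-- ===== VERDICT (by name: the statement is the Claim_ definition above) =====
theorem get_scorers_str_py_spec : Claim_equal_get_scorers_str_py := by
  intro games html_text _ hpre
  unfold Spec_get_scorers_str_py
  rw [pv_A_eq games html_text hpre.1, pv_B_eq games html_text]
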